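-- pv_equiv track=rewrite | github.com/adbrasi/wd14-tagger-mini | tag_images_by_wd14_tagger.py | apply_tag_replacement
-- ===== SOURCE A (Python) =====
-- from typing import Any, Dict, Iterable, List, Optional, Tuple
--
-- def apply_tag_replacement(tags: List[str], tag_replacements_arg: str) -> List[str]:
--     escaped = tag_replacements_arg.replace("\\,", "@@@@").replace("\\;", "####")
--     pairs = escaped.split(";")
--
--     for pair in pairs:
--         parts = pair.split(",", 1)
--         if len(parts) != 2:
--             continue
--         source, target = parts
--         source = source.replace("@@@@", ",").replace("####", ";")
--         target = target.replace("@@@@", ",").replace("####", ";")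
--         tags = [target if t == source else t for t in tags]
--
--     return tags
-- ===== SOURCE B (Python) =====
-- def apply_tag_replacement(tags, tag_replacements_arg):
--     escaped = tag_replacements_arg.replace("\\,", "@@@@").replace("\\;", "####")
--     pairs = []
--     for pair in escaped.split(";"):
--         parts = pair.split(",", 1)
--         if len(parts) == 2:
--             source, target = parts
--             pairs.append((source.replace("@@@@", ",").replace("####", ";"),
--                           target.replace("@@@@", ",").replace("####", ";")))
--     # compute each distinct tag's final image once, memoised, instead of
--     # rewriting the whole tag list once per replacement pair
--     cache = {}
--     out = []
--     for t in tags: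
--         if t not in cache:
--             v = t
--             for source, target in pairs:
--                 if v == source:
--                     v = target
--             cache[t] = v
--         out.append(cache[t])
--     return out
-- ===== Notes on version B (the rewrite author's own statement) =====
-- stated objective: alternative
-- what changed: Instead of rebuilding the whole tag list once per replacement pair, B parses the pairs once and computes each distinct tag's final image with a single memoised fold over the pairs, then emits the cached images; it trades A's per-pair list rewrites for per-distinct-tag work.
import Mathlib
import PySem

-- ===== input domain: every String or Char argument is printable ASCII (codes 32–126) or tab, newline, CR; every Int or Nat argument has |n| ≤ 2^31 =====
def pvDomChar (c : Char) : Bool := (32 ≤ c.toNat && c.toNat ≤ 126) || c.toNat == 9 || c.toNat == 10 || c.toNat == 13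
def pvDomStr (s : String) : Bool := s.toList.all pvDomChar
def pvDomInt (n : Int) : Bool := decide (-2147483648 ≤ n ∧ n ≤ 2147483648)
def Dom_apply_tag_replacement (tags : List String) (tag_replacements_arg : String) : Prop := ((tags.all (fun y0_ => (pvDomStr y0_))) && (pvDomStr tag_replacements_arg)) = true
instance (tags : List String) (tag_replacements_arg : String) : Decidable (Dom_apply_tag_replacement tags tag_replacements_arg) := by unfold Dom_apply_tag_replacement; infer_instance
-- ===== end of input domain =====

-- B parses the replacement pairs once and memoises each distinct tag's final image
-- (one fold over the pairs per distinct tag) instead of rewriting the whole list per pair.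


-- shared helper: un-escape "@@@@" back to "," and "####" back to ";" (both Pythons do this verbatim)
def pvUnesc (s : String) : String :=
  PySem.Str.replace (PySem.Str.replace s "@@@@" ",") "####" ";"

-- ===== PORT A =====
-- one iteration of A's `for pair in pairs` loop (split(",", 1), continue unless 2 parts, rewrite list)
def pvStepA (tags : List String) (pair : String) : List String :=
  match (PySem.Str.splitMax? pair "," 1).getD [] with
  | [source, target] =>
      let source := pvUnesc source
      let target := pvUnesc target
      tags.map (fun t => if t = source then target else t)
  | _ => tags

def apply_tag_replacement (tags : List String) (tag_replacements_arg : String) : List String :=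
  let escaped := PySem.Str.replace (PySem.Str.replace tag_replacements_arg "\\," "@@@@") "\\;" "####"
  let pairs := (PySem.Str.split? escaped ";").getD []
  pairs.foldl pvStepA tags

-- ===== PORT B =====
-- B's parsing loop: collect the well-formed (source, target) pairs
def pvParseStep (acc : List (String × String)) (pair : String) : List (String × String) :=
  match (PySem.Str.splitMax? pair "," 1).getD [] with
  | [source, target] => acc ++ [(pvUnesc source, pvUnesc target)]
  | _ => acc

-- B's inner fold: final image of one tag value under the pair sequence
def pvFinal (pairs : List (String × String)) (t : String) : String :=
  pairs.foldl (fun v p => if v = p.1 then p.2 else v) t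

-- B's main loop body: memo cache (dict) plus output list
def pvCacheStep (pairs : List (String × String))
    (st : PySem.Dict String String × List String) (t : String) :
    PySem.Dict String String × List String :=
  let cache := if st.1.contains t then st.1 else st.1.insert t (pvFinal pairs t)
  (cache, st.2 ++ [cache.getD t t])

def apply_tag_replacement_alt (tags : List String) (tag_replacements_arg : String) : List String :=
  let escaped := PySem.Str.replace (PySem.Str.replace tag_replacements_arg "\\," "@@@@") "\\;" "####"
  let pairs := ((PySem.Str.split? escaped ";").getD []).foldl pvParseStep []
  (tags.foldl (pvCacheStep pairs) (PySem.Dict.empty, [])).2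

-- ===== PRECONDITION & SPEC =====
def Spec_apply_tag_replacement (tags : List String) (tag_replacements_arg : String) (out : List String) : Prop := out = apply_tag_replacement_alt tags tag_replacements_arg
instance (tags : List String) (tag_replacements_arg : String) (out : List String) : Decidable (Spec_apply_tag_replacement tags tag_replacements_arg out) := by unfold Spec_apply_tag_replacement; infer_instance

-- ===== CLAIM (what is proved, stated in full; the proofs are below) =====
def Claim_equal_apply_tag_replacement : Prop := ∀ (tags : List String) (tag_replacements_arg : String), Dom_apply_tag_replacement tags tag_replacements_arg → Spec_apply_tag_replacement tags tag_replacements_arg (apply_tag_replacement tags tag_replacements_arg)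

-- ===== LEMMAS AND PROOFS =====

-- effect of one raw pair string on a single tag value (proof-only helper)
def pvApplyRaw (v : String) (pair : String) : String :=
  match (PySem.Str.splitMax? pair "," 1).getD [] with
  | [source, target] => if v = pvUnesc source then pvUnesc target else v
  | _ => v

theorem pvStepA_eq_map (tags : List String) (pair : String) :
    pvStepA tags pair = tags.map (fun t => pvApplyRaw t pair) := by
  unfold pvStepA pvApplyRaw
  rcases h : (PySem.Str.splitMax? pair "," 1).getD [] with _ | ⟨s, _ | ⟨tg, _ | _⟩⟩ <;>
    simp

theorem foldl_stepA_eq_map (prs : List String) (tags : List String) :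
    prs.foldl pvStepA tags = tags.map (fun t => prs.foldl pvApplyRaw t) := by
  induction prs generalizing tags with
  | nil => simp
  | cons pr prs ih =>
      simp only [List.foldl_cons, ih, pvStepA_eq_map, List.map_map]
      rfl

theorem foldl_parseStep_acc (prs : List String) (acc : List (String × String)) :
    prs.foldl pvParseStep acc = acc ++ prs.foldl pvParseStep [] := by
  induction prs generalizing acc with
  | nil => simp
  | cons pr prs ih =>
      simp only [List.foldl_cons]
      rw [ih, ih (pvParseStep [] pr)]
      unfold pvParseStep
      rcases h : (PySem.Str.splitMax? pr "," 1).getD [] with _ | ⟨s, _ | ⟨tg, _ | _⟩⟩ <;>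
        simp

theorem pvFinal_append (a b : List (String × String)) (t : String) :
    pvFinal (a ++ b) t = pvFinal b (pvFinal a t) := by
  unfold pvFinal
  exact List.foldl_append

theorem foldl_applyRaw_eq_final (prs : List String) (t : String) :
    prs.foldl pvApplyRaw t = pvFinal (prs.foldl pvParseStep []) t := by
  induction prs generalizing t with
  | nil => simp [pvFinal]
  | cons pr prs ih =>
      simp only [List.foldl_cons]
      rw [ih, foldl_parseStep_acc prs (pvParseStep [] pr), pvFinal_append]
      congr 1
      unfold pvParseStep pvApplyRaw
      rcases h : (PySem.Str.splitMax? pr "," 1).getD [] with _ | ⟨s, _ | ⟨tg, _ | _⟩⟩ <;>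
        simp [pvFinal]

theorem cache_loop (pairs : List (String × String)) (tags : List String)
    (d : PySem.Dict String String) (acc : List String)
    (hd : ∀ k, d.contains k = true → d.getD k k = pvFinal pairs k) :
    (tags.foldl (pvCacheStep pairs) (d, acc)).2 = acc ++ tags.map (pvFinal pairs) := by
  induction tags generalizing d acc with
  | nil => simp
  | cons t ts ih =>
      by_cases hc : d.contains t = true
      · have hstep : pvCacheStep pairs (d, acc) t = (d, acc ++ [d.getD t t]) := by
          simp [pvCacheStep, hc]
        rw [List.foldl_cons, hstep, ih d _ hd, hd t hc]
        simp
      · have hb : d.contains t = false := by simpa using hc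
        have hstep : pvCacheStep pairs (d, acc) t
            = (d.insert t (pvFinal pairs t),
               acc ++ [(d.insert t (pvFinal pairs t)).getD t t]) := by
          simp [pvCacheStep, hb]
        have hinv : ∀ k, (d.insert t (pvFinal pairs t)).contains k = true →
            (d.insert t (pvFinal pairs t)).getD k k = pvFinal pairs k := by
          intro k hk
          by_cases hkt : k = t
          · subst hkt; rw [PySem.Dict.getD_insert_self]
          · rw [PySem.Dict.getD_insert_of_ne _ _ _ hkt]
            apply hd
            rw [PySem.Dict.contains_insert] at hk
            simpa [hkt] using hk
        rw [List.foldl_cons, hstep, ih _ _ hinv, PySem.Dict.getD_insert_self]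
        simp

-- ===== VERDICT (by name: the statement is the Claim_ definition above) =====
theorem apply_tag_replacement_spec : Claim_equal_apply_tag_replacement := by
  intro tags arg _
  unfold Spec_apply_tag_replacement
  show apply_tag_replacement tags arg = apply_tag_replacement_alt tags arg
  unfold apply_tag_replacement apply_tag_replacement_alt
  rw [foldl_stepA_eq_map, cache_loop]
  · simp [foldl_applyRaw_eq_final]
  · intro k hk
    simp [PySem.Dict.contains_empty] at hk
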